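-- pv_equiv track=rewrite | github.com/sumrae412/slidegenerator | slide_generator_pkg/powerpoint_generator.py | _determine_educational_visual_metaphor
-- ===== SOURCE A (Python) =====
-- from typing import List, Dict, Optional, Tuple, Any
--
-- def _determine_educational_visual_metaphor(all_text: str, bullet_points: List[str]) -> str:
--     """Determine the best visual metaphor for educational content"""
--
--     # Process/workflow/steps content
--     if any(word in all_text for word in ['process', 'step', 'workflow', 'sequence', 'first', 'then', 'next', 'finally']):
--         return "A series of connected geometric shapes forming a path, with icons representing each step in the process. Simple arrows guide the flow from start to finish."
--
--     # Comparison/contrast content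
--     elif any(word in all_text for word in ['compare', 'versus', 'vs', 'difference', 'before', 'after', 'traditional', 'modern']):
--         return "A split composition with two distinct sides - one representing the old/traditional approach (muted colors, simple shapes) and the other showing the new/modern approach (bright colors, dynamic shapes)."
--
--     # AI/Technology content
--     elif any(word in all_text for word in ['ai', 'artificial', 'intelligence', 'machine learning', 'algorithm', 'neural', 'model']):
--         return "A stylized brain made of interconnected nodes and circuits, with data flowing through neural pathways. Geometric patterns suggest computational processing."
--
--     # Speed/efficiency content
--     elif any(word in all_text for word in ['fast', 'quick', 'rapid', 'speed', 'efficient', 'streamline']):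
--         return "A minimalist rocket or arrow moving through simplified obstacles, leaving a trail of progress markers. Motion lines suggest speed and efficiency."
--
--     # Building/creating content
--     elif any(word in all_text for word in ['build', 'create', 'develop', 'construct', 'design', 'prototype']):
--         return "Building blocks or puzzle pieces coming together to form a complete structure. Each piece represents a component of the solution."
--
--     # Learning/education content
--     elif any(word in all_text for word in ['learn', 'understand', 'master', 'discover', 'explore', 'knowledge']):
--         return "A lightbulb with rays emanating outward, surrounded by simple icons representing different concepts being illuminated and understood."
--
--     # Problem/solution content
--     elif any(word in all_text for word in ['problem', 'solution', 'challenge', 'solve', 'fix', 'resolve']):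
--         return "A maze or tangled path on the left transforming into a clear, straight path on the right. A key or tool bridges the transformation."
--
--     # Tools/resources content
--     elif any(word in all_text for word in ['tool', 'resource', 'platform', 'framework', 'library', 'api']):
--         return "A toolbox with simplified tool icons floating above it, each tool connected to its application with dotted lines."
--
--     # Data/analysis content
--     elif any(word in all_text for word in ['data', 'analysis', 'metrics', 'measure', 'statistics', 'visualization']):
--         return "Abstract data points transforming into organized charts and graphs. Flowing lines connect raw data to meaningful insights."
--
--     # Collaboration/team content
--     elif any(word in all_text for word in ['team', 'collaborate', 'together', 'share', 'communicate', 'feedback']):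
--         return "Simplified human figures arranged in a circle, with connecting lines showing information flow. Speech bubbles or thought clouds overlap to show shared ideas."
--
--     # Growth/improvement content
--     elif any(word in all_text for word in ['grow', 'improve', 'enhance', 'evolve', 'progress', 'advance']):
--         return "A plant or tree growing from seed to full bloom, with each stage clearly defined. Growth stages align with concept progression."
--
--     # Testing/validation content
--     elif any(word in all_text for word in ['test', 'validate', 'verify', 'check', 'quality', 'debug']):
--         return "A magnifying glass examining different geometric shapes, with checkmarks appearing on validated items and X marks on issues to fix."
--
--     # Default educational visual
--     else:
--         return "Interconnected circles representing concepts, with the largest circle in the center and smaller related concepts orbiting around it. Lines show relationships between ideas."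
-- ===== SOURCE B (Python) =====
-- from typing import List
--
-- _RULES = [
--     (['process', 'step', 'workflow', 'sequence', 'first', 'then', 'next', 'finally'], 'A series of connected geometric shapes forming a path, with icons representing each step in the process. Simple arrows guide the flow from start to finish.'),
--     (['compare', 'versus', 'vs', 'difference', 'before', 'after', 'traditional', 'modern'], 'A split composition with two distinct sides - one representing the old/traditional approach (muted colors, simple shapes) and the other showing the new/modern approach (bright colors, dynamic shapes).'),
--     (['ai', 'artificial', 'intelligence', 'machine learning', 'algorithm', 'neural', 'model'], 'A stylized brain made of interconnected nodes and circuits, with data flowing through neural pathways. Geometric patterns suggest computational processing.'),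
--     (['fast', 'quick', 'rapid', 'speed', 'efficient', 'streamline'], 'A minimalist rocket or arrow moving through simplified obstacles, leaving a trail of progress markers. Motion lines suggest speed and efficiency.'),
--     (['build', 'create', 'develop', 'construct', 'design', 'prototype'], 'Building blocks or puzzle pieces coming together to form a complete structure. Each piece represents a component of the solution.'),
--     (['learn', 'understand', 'master', 'discover', 'explore', 'knowledge'], 'A lightbulb with rays emanating outward, surrounded by simple icons representing different concepts being illuminated and understood.'),
--     (['problem', 'solution', 'challenge', 'solve', 'fix', 'resolve'], 'A maze or tangled path on the left transforming into a clear, straight path on the right. A key or tool bridges the transformation.'),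
--     (['tool', 'resource', 'platform', 'framework', 'library', 'api'], 'A toolbox with simplified tool icons floating above it, each tool connected to its application with dotted lines.'),
--     (['data', 'analysis', 'metrics', 'measure', 'statistics', 'visualization'], 'Abstract data points transforming into organized charts and graphs. Flowing lines connect raw data to meaningful insights.'),
--     (['team', 'collaborate', 'together', 'share', 'communicate', 'feedback'], 'Simplified human figures arranged in a circle, with connecting lines showing information flow. Speech bubbles or thought clouds overlap to show shared ideas.'),
--     (['grow', 'improve', 'enhance', 'evolve', 'progress', 'advance'], 'A plant or tree growing from seed to full bloom, with each stage clearly defined. Growth stages align with concept progression.'),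
--     (['test', 'validate', 'verify', 'check', 'quality', 'debug'], 'A magnifying glass examining different geometric shapes, with checkmarks appearing on validated items and X marks on issues to fix.'),
-- ]
--
-- _DEFAULT = 'Interconnected circles representing concepts, with the largest circle in the center and smaller related concepts orbiting around it. Lines show relationships between ideas.'
--
-- _TEXTS = [text for _, text in _RULES]
-- _KEYWORD_PRIORITY = [(kw, i) for i, (kws, _) in enumerate(_RULES) for kw in kws]
--
-- # bucket the keywords by first character
-- _BY_FIRST = {}
-- for _kw, _pri in _KEYWORD_PRIORITY:
--     _BY_FIRST[_kw[0]] = _BY_FIRST.get(_kw[0], []) + [(_kw, _pri)]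
--
--
-- def _determine_educational_visual_metaphor(all_text: str, bullet_points: List[str]) -> str:
--     # Text-driven scan: walk every position of the text once, check (via the
--     # first-character buckets) which keywords start there, and record the best
--     # (lowest) matched category priority; finally index into the texts table.
--     # The minimum matched priority equals the first matching branch of the
--     # original chain.
--     best = len(_TEXTS)
--     for i in range(len(all_text)):
--         for kw, pri in _BY_FIRST.get(all_text[i], ()):
--             if pri < best and all_text.startswith(kw, i):
--                 best = pri
--     return _TEXTS[best] if best < len(_TEXTS) else _DEFAULT
-- ===== Notes on version B (the rewrite author's own statement) =====
-- stated objective: alternative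
-- what changed: Instead of testing each rule's keywords against the whole text in priority order with first-match return, B makes a text-driven scan: it walks every position of all_text once, uses a dict bucketing the keywords by first character to find which keywords start there, keeps the minimum matched category priority, and finally indexes into the texts table (the minimum matched priority equals A's first matching branch).
import Mathlib
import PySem

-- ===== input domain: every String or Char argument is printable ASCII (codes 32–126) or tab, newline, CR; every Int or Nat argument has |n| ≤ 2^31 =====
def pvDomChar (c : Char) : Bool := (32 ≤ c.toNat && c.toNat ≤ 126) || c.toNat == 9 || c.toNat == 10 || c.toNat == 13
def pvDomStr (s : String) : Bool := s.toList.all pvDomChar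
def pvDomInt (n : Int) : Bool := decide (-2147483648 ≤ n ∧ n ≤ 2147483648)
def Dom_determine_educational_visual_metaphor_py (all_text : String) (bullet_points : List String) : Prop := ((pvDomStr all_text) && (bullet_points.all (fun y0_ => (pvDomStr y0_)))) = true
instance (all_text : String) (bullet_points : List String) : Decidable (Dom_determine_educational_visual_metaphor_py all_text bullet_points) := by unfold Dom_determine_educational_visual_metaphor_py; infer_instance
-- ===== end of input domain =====

-- ===== PORT A =====
-- B replaces A's priority-ordered first-match keyword chain by a single scan over the text
-- positions that keeps the minimum matched category priority (objective: alternative).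
def determine_educational_visual_metaphor_py (all_text : String) (bullet_points : List String) : String :=
  if (["process", "step", "workflow", "sequence", "first", "then", "next", "finally"] : List String).any (fun word => PySem.Str.isIn word all_text) then
    "A series of connected geometric shapes forming a path, with icons representing each step in the process. Simple arrows guide the flow from start to finish."
  else if (["compare", "versus", "vs", "difference", "before", "after", "traditional", "modern"] : List String).any (fun word => PySem.Str.isIn word all_text) then
    "A split composition with two distinct sides - one representing the old/traditional approach (muted colors, simple shapes) and the other showing the new/modern approach (bright colors, dynamic shapes)."
  else if (["ai", "artificial", "intelligence", "machine learning", "algorithm", "neural", "model"] : List String).any (fun word => PySem.Str.isIn word all_text) then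
    "A stylized brain made of interconnected nodes and circuits, with data flowing through neural pathways. Geometric patterns suggest computational processing."
  else if (["fast", "quick", "rapid", "speed", "efficient", "streamline"] : List String).any (fun word => PySem.Str.isIn word all_text) then
    "A minimalist rocket or arrow moving through simplified obstacles, leaving a trail of progress markers. Motion lines suggest speed and efficiency."
  else if (["build", "create", "develop", "construct", "design", "prototype"] : List String).any (fun word => PySem.Str.isIn word all_text) then
    "Building blocks or puzzle pieces coming together to form a complete structure. Each piece represents a component of the solution."
  else if (["learn", "understand", "master", "discover", "explore", "knowledge"] : List String).any (fun word => PySem.Str.isIn word all_text) then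
    "A lightbulb with rays emanating outward, surrounded by simple icons representing different concepts being illuminated and understood."
  else if (["problem", "solution", "challenge", "solve", "fix", "resolve"] : List String).any (fun word => PySem.Str.isIn word all_text) then
    "A maze or tangled path on the left transforming into a clear, straight path on the right. A key or tool bridges the transformation."
  else if (["tool", "resource", "platform", "framework", "library", "api"] : List String).any (fun word => PySem.Str.isIn word all_text) then
    "A toolbox with simplified tool icons floating above it, each tool connected to its application with dotted lines."
  else if (["data", "analysis", "metrics", "measure", "statistics", "visualization"] : List String).any (fun word => PySem.Str.isIn word all_text) then
    "Abstract data points transforming into organized charts and graphs. Flowing lines connect raw data to meaningful insights."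
  else if (["team", "collaborate", "together", "share", "communicate", "feedback"] : List String).any (fun word => PySem.Str.isIn word all_text) then
    "Simplified human figures arranged in a circle, with connecting lines showing information flow. Speech bubbles or thought clouds overlap to show shared ideas."
  else if (["grow", "improve", "enhance", "evolve", "progress", "advance"] : List String).any (fun word => PySem.Str.isIn word all_text) then
    "A plant or tree growing from seed to full bloom, with each stage clearly defined. Growth stages align with concept progression."
  else if (["test", "validate", "verify", "check", "quality", "debug"] : List String).any (fun word => PySem.Str.isIn word all_text) then
    "A magnifying glass examining different geometric shapes, with checkmarks appearing on validated items and X marks on issues to fix."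
  else "Interconnected circles representing concepts, with the largest circle in the center and smaller related concepts orbiting around it. Lines show relationships between ideas."

-- ===== PORT B =====
-- _RULES
def pvRules : List (List String × String) :=
  [(["process", "step", "workflow", "sequence", "first", "then", "next", "finally"], "A series of connected geometric shapes forming a path, with icons representing each step in the process. Simple arrows guide the flow from start to finish."),
   (["compare", "versus", "vs", "difference", "before", "after", "traditional", "modern"], "A split composition with two distinct sides - one representing the old/traditional approach (muted colors, simple shapes) and the other showing the new/modern approach (bright colors, dynamic shapes)."),
   (["ai", "artificial", "intelligence", "machine learning", "algorithm", "neural", "model"], "A stylized brain made of interconnected nodes and circuits, with data flowing through neural pathways. Geometric patterns suggest computational processing."),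
   (["fast", "quick", "rapid", "speed", "efficient", "streamline"], "A minimalist rocket or arrow moving through simplified obstacles, leaving a trail of progress markers. Motion lines suggest speed and efficiency."),
   (["build", "create", "develop", "construct", "design", "prototype"], "Building blocks or puzzle pieces coming together to form a complete structure. Each piece represents a component of the solution."),
   (["learn", "understand", "master", "discover", "explore", "knowledge"], "A lightbulb with rays emanating outward, surrounded by simple icons representing different concepts being illuminated and understood."),
   (["problem", "solution", "challenge", "solve", "fix", "resolve"], "A maze or tangled path on the left transforming into a clear, straight path on the right. A key or tool bridges the transformation."),
   (["tool", "resource", "platform", "framework", "library", "api"], "A toolbox with simplified tool icons floating above it, each tool connected to its application with dotted lines."),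
   (["data", "analysis", "metrics", "measure", "statistics", "visualization"], "Abstract data points transforming into organized charts and graphs. Flowing lines connect raw data to meaningful insights."),
   (["team", "collaborate", "together", "share", "communicate", "feedback"], "Simplified human figures arranged in a circle, with connecting lines showing information flow. Speech bubbles or thought clouds overlap to show shared ideas."),
   (["grow", "improve", "enhance", "evolve", "progress", "advance"], "A plant or tree growing from seed to full bloom, with each stage clearly defined. Growth stages align with concept progression."),
   (["test", "validate", "verify", "check", "quality", "debug"], "A magnifying glass examining different geometric shapes, with checkmarks appearing on validated items and X marks on issues to fix.")]

-- _DEFAULT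
def pvDefault : String :=
  "Interconnected circles representing concepts, with the largest circle in the center and smaller related concepts orbiting around it. Lines show relationships between ideas."

-- _TEXTS = [text for _, text in _RULES]
def pvTexts : List String := pvRules.map Prod.snd

-- helper for the comprehension [(kw, i) for i, (kws, _) in enumerate(_RULES) for kw in kws]
def pvFlat : Nat → List (List String × String) → List (String × Nat)
  | _, [] => []
  | k, (kws, _) :: rest => kws.map (fun w => (w, k)) ++ pvFlat (k + 1) rest

-- _KEYWORD_PRIORITY
def pvKeywordPriority : List (String × Nat) := pvFlat 0 pvRules

-- the inner loop body: if pri < best and all_text.startswith(kw, i): best = pri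
def pvStep (Q : String × Nat → Bool) (b : Nat) (kp : String × Nat) : Nat :=
  if kp.2 < b ∧ Q kp = true then kp.2 else b

-- _BY_FIRST: keywords bucketed by first character; kw[0] is ported as headD ' ' —
-- every keyword in the literal table is nonempty, so the default is never used.
def pvByFirst : PySem.Dict Char (List (String × Nat)) :=
  pvKeywordPriority.foldl
    (fun d kp => d.modify (kp.1.toList.headD ' ') [] (fun v => v ++ [kp]))
    PySem.Dict.empty

def determine_educational_visual_metaphor_py_alt (all_text : String) (bullet_points : List String) : String :=
  let l := all_text.toList
  let best := (PySem.List.pyRange 0 (l.length : Int) 1).foldl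
    (fun b i =>
      -- all_text[i] via pyGetD (i is always in range, so the default is never used);
      -- all_text.startswith(kw, i) is exactly the prefix test on l.drop i.toNat for 0 ≤ i
      (pvByFirst.getD (PySem.List.pyGetD l i ' ') []).foldl
        (pvStep (fun kp => PySem.Chars.startswith (l.drop i.toNat) kp.1.toList)) b)
    pvTexts.length
  if best < pvTexts.length then pvTexts.getD best pvDefault else pvDefault

-- ===== PRECONDITION & SPEC =====
def Spec_determine_educational_visual_metaphor_py (all_text : String) (bullet_points : List String) (out : String) : Prop := out = determine_educational_visual_metaphor_py_alt all_text bullet_points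
instance (all_text : String) (bullet_points : List String) (out : String) : Decidable (Spec_determine_educational_visual_metaphor_py all_text bullet_points out) := by unfold Spec_determine_educational_visual_metaphor_py; infer_instance

-- ===== CLAIM =====
def Claim_equal_determine_educational_visual_metaphor_py : Prop := ∀ (all_text : String) (bullet_points : List String), Dom_determine_educational_visual_metaphor_py all_text bullet_points → Spec_determine_educational_visual_metaphor_py all_text bullet_points (determine_educational_visual_metaphor_py all_text bullet_points)

-- ===== LEMMAS AND PROOFS =====

-- fold of pvStep = foldl min over the priorities of the entries accepted by Q
theorem pv_fold_step_eq (Q : String × Nat → Bool) :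
    ∀ (L : List (String × Nat)) (b : Nat),
      L.foldl (pvStep Q) b = List.foldl min b ((L.filter Q).map Prod.snd) := by
  intro L
  induction L with
  | nil => intro b; rfl
  | cons kp rest ih =>
    intro b
    by_cases hq : Q kp = true
    · have hstep : pvStep Q b kp = min b kp.2 := by
        unfold pvStep
        by_cases h : kp.2 < b
        · simp [h, hq]; omega
        · simp [h, hq]; omega
      simp [hq, List.foldl_cons, hstep, ih]
    · have hstep : pvStep Q b kp = b := by
        unfold pvStep
        simp [hq]
      simp [hq, List.foldl_cons, hstep, ih]

theorem pv_fmin_le_init : ∀ (xs : List Nat) (b : Nat), List.foldl min b xs ≤ b := by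
  intro xs
  induction xs with
  | nil => intro b; simp
  | cons x rest ih =>
    intro b
    calc List.foldl min (min b x) rest ≤ min b x := ih _
    _ ≤ b := min_le_left _ _

theorem pv_fmin_le_mem : ∀ (xs : List Nat) (b x : Nat), x ∈ xs → List.foldl min b xs ≤ x := by
  intro xs
  induction xs with
  | nil => intro b x hx; simp at hx
  | cons y rest ih =>
    intro b x hx
    rcases List.mem_cons.mp hx with h | h
    · subst h
      calc List.foldl min (min b x) rest ≤ min b x := pv_fmin_le_init _ _
      _ ≤ x := min_le_right _ _
    · exact ih _ _ h

theorem pv_fmin_cases : ∀ (xs : List Nat) (b : Nat),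
    List.foldl min b xs = b ∨ List.foldl min b xs ∈ xs := by
  intro xs
  induction xs with
  | nil => intro b; left; rfl
  | cons x rest ih =>
    intro b
    rcases ih (min b x) with h | h
    · simp only [List.foldl_cons]
      by_cases hbx : b ≤ x
      · left; rw [h]; omega
      · right; rw [h]; simp; left; omega
    · right
      simp only [List.foldl_cons]
      exact List.mem_cons_of_mem _ h

theorem pv_fmin_ext (xs ys : List Nat) (b : Nat) (h : ∀ x, x ∈ xs ↔ x ∈ ys) :
    List.foldl min b xs = List.foldl min b ys := by
  apply le_antisymm
  · rcases pv_fmin_cases ys b with hy | hy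
    · rw [hy]; exact pv_fmin_le_init _ _
    · exact pv_fmin_le_mem _ _ _ ((h _).mpr hy)
  · rcases pv_fmin_cases xs b with hx | hx
    · rw [hx]; exact pv_fmin_le_init _ _
    · exact pv_fmin_le_mem _ _ _ ((h _).mp hx)

-- outer fold over positions = foldl min over all candidates from all positions
theorem pv_outer_eq (tbl : Nat → List (String × Nat)) (Qf : Nat → String × Nat → Bool) :
    ∀ (n : Nat) (b : Nat),
      (List.range n).foldl (fun b i => (tbl i).foldl (pvStep (Qf i)) b) b
      = List.foldl min b
          ((List.range n).flatMap (fun i => ((tbl i).filter (Qf i)).map Prod.snd)) := by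
  intro n
  induction n with
  | zero => intro b; rfl
  | succ m ih =>
    intro b
    rw [List.range_succ, List.foldl_append, List.flatMap_append, List.foldl_append, ih]
    simp [pv_fold_step_eq]

-- a keyword starts at some position in the text iff it is a substring (keyword nonempty)
theorem pv_sw_iff (l : List Char) (w : List Char) (hw : w ≠ []) :
    (∃ i ∈ List.range l.length, PySem.Chars.startswith (l.drop i) w = true)
      ↔ PySem.Chars.isIn w l = true := by
  constructor
  · rintro ⟨i, _, hsw⟩
    rw [← PySem.Chars.exists_prefix_drop_iff_isIn]
    exact ⟨i, (PySem.Chars.startswith_iff _ _).mp hsw⟩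
  · intro hin
    rcases (PySem.Chars.exists_prefix_drop_iff_isIn w l).mpr hin with ⟨j, hj⟩
    by_cases hjl : j < l.length
    · exact ⟨j, List.mem_range.mpr hjl, (PySem.Chars.startswith_iff _ _).mpr hj⟩
    · exfalso
      have : l.drop j = [] := List.drop_eq_nil_of_le (by omega)
      rw [this] at hj
      exact hw (List.prefix_nil.mp hj)

-- no keyword of the table is empty
theorem pv_table_ne : ∀ kp ∈ pvKeywordPriority, kp.1.toList ≠ [] := by decide

-- bucket membership: the first-character dict holds exactly the table entries with that head
theorem pv_bucket_mem (c : Char) (kp : String × Nat) :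
    kp ∈ pvByFirst.getD c [] ↔ kp ∈ pvKeywordPriority ∧ kp.1.toList.headD ' ' = c := by
  have hfold : pvByFirst
      = (pvKeywordPriority.map (fun kp => (kp.1.toList.headD ' ', kp))).foldl
          (fun d p => d.modify p.1 [] (fun v => v ++ [p.2])) PySem.Dict.empty := by
    rw [List.foldl_map]
    rfl
  rw [hfold, PySem.Dict.getD_foldl_modify_append]
  simp only [PySem.Dict.getD_empty, List.nil_append, List.mem_map, List.mem_filter]
  constructor
  · rintro ⟨p, ⟨⟨kp', hkp', hp⟩, hc⟩, hkp⟩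
    subst hp
    simp only at hkp hc
    subst hkp
    exact ⟨hkp', by simpa using hc⟩
  · rintro ⟨hmem, hc⟩
    exact ⟨(c, kp), ⟨⟨kp, hmem, by rw [hc]⟩, by simp⟩, rfl⟩

-- a keyword starting at position i < len has the text's character at i as its head
theorem pv_head_of_sw (l : List Char) (w : List Char) (i : Nat) (hi : i < l.length)
    (hw : w ≠ []) (hsw : PySem.Chars.startswith (l.drop i) w = true) :
    w.headD ' ' = l.getD i ' ' := by
  have hpre : w <+: l.drop i := (PySem.Chars.startswith_iff _ _).mp hsw
  obtain ⟨h, t, rfl⟩ := List.exists_cons_of_ne_nil hw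
  rw [← List.getElem_cons_drop hi] at hpre
  rcases List.cons_prefix_cons.mp hpre with ⟨rfl, -⟩
  simp [List.getD_eq_getElem?_getD, hi]

-- the candidate multisets (position-driven, bucketed vs substring-driven) have the same members
theorem pv_cand_mem (l : List Char) (x : Nat) :
    x ∈ (List.range l.length).flatMap
          (fun i => ((pvByFirst.getD (l.getD i ' ') []).filter
              (fun kp => PySem.Chars.startswith (l.drop i) kp.1.toList)).map Prod.snd)
      ↔ x ∈ (pvKeywordPriority.filter (fun kp => PySem.Chars.isIn kp.1.toList l)).map Prod.snd := by
  simp only [List.mem_flatMap, List.mem_map, List.mem_filter]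
  constructor
  · rintro ⟨i, hi, kp, ⟨hbkt, hsw⟩, hx⟩
    have hmem := ((pv_bucket_mem _ kp).mp hbkt).1
    exact ⟨kp, ⟨hmem, (pv_sw_iff l kp.1.toList (pv_table_ne kp hmem)).mp ⟨i, hi, hsw⟩⟩, hx⟩
  · rintro ⟨kp, ⟨hmem, hin⟩, hx⟩
    rcases (pv_sw_iff l kp.1.toList (pv_table_ne kp hmem)).mpr hin with ⟨i, hi, hsw⟩
    have hlt : i < l.length := List.mem_range.mp hi
    have hhead := pv_head_of_sw l kp.1.toList i hlt (pv_table_ne kp hmem) hsw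
    exact ⟨i, hi, kp, ⟨(pv_bucket_mem _ kp).mpr ⟨hmem, hhead⟩, hsw⟩, hx⟩

-- first-matching-rule index computed chain-wise
def pvChainIdx (P : String → Bool) : List (List String × String) → Nat → Nat → Nat
  | [], _, b => b
  | (kws, _) :: rest, k, b => if kws.any P then k else pvChainIdx P rest (k + 1) b

theorem pv_flat_ge : ∀ (rules : List (List String × String)) (k : Nat),
    ∀ kp ∈ pvFlat k rules, k ≤ kp.2 := by
  intro rules
  induction rules with
  | nil => intro k kp h; simp [pvFlat] at h
  | cons r rest ih =>
    intro k kp h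
    obtain ⟨kws, t⟩ := r
    simp only [pvFlat, List.mem_append, List.mem_map] at h
    rcases h with ⟨w, _, hw⟩ | h
    · subst hw; simp
    · have := ih (k + 1) kp h
      omega

theorem pv_fold_stay (Q : String × Nat → Bool) :
    ∀ (L : List (String × Nat)) (b : Nat), (∀ kp ∈ L, b ≤ kp.2) →
      L.foldl (pvStep Q) b = b := by
  intro L
  induction L with
  | nil => intro b _; rfl
  | cons kp rest ih =>
    intro b h
    have h1 : b ≤ kp.2 := h kp (List.mem_cons_self)
    have hstep : pvStep Q b kp = b := by
      unfold pvStep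
      have : ¬ (kp.2 < b) := by omega
      simp [this]
    rw [List.foldl_cons, hstep]
    exact ih b (fun x hx => h x (List.mem_cons_of_mem _ hx))

theorem pv_fold_kws (Q : String × Nat → Bool) :
    ∀ (kws : List String) (k b : Nat), k < b →
      (kws.map (fun w => (w, k))).foldl (pvStep Q) b
        = if kws.any (fun w => Q (w, k)) then k else b := by
  intro kws
  induction kws with
  | nil => intro k b _; rfl
  | cons w rest ih =>
    intro k b hkb
    simp only [List.map_cons, List.foldl_cons, List.any_cons]
    by_cases hq : Q (w, k) = true
    · have hstep : pvStep Q b (w, k) = k := by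
        unfold pvStep; simp [hq, hkb]
      rw [hstep]
      have : (rest.map (fun w => (w, k))).foldl (pvStep Q) k = k := by
        apply pv_fold_stay
        intro kp hkp
        simp only [List.mem_map] at hkp
        obtain ⟨w', _, hw'⟩ := hkp
        subst hw'; simp
      simp [this, hq]
    · have hstep : pvStep Q b (w, k) = b := by
        unfold pvStep; simp [hq]
      rw [hstep, ih k b hkb]
      simp [hq]

theorem pv_flat_fold_eq (P : String → Bool) :
    ∀ (rules : List (List String × String)) (k b : Nat), k + rules.length ≤ b →
      (pvFlat k rules).foldl (pvStep (fun kp => P kp.1)) b = pvChainIdx P rules k b := by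
  intro rules
  induction rules with
  | nil => intro k b _; rfl
  | cons r rest ih =>
    intro k b hkb
    obtain ⟨kws, t⟩ := r
    simp only [List.length_cons] at hkb
    have hkb' : k < b := by omega
    simp only [pvFlat, pvChainIdx, List.foldl_append]
    rw [pv_fold_kws (fun kp => P kp.1) kws k b hkb']
    by_cases hany : kws.any P = true
    · have : kws.any (fun w => P (w, k).1) = true := hany
      rw [if_pos this, if_pos hany]
      apply pv_fold_stay
      intro kp hkp
      have := pv_flat_ge rest (k + 1) kp hkp
      omega
    · have : ¬ (kws.any (fun w => P (w, k).1) = true) := hany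
      rw [if_neg this, if_neg hany]
      exact ih (k + 1) b (by omega)

-- B's value, expressed through the chain index
theorem pv_alt_eq_chain (all_text : String) (bullet_points : List String) :
    determine_educational_visual_metaphor_py_alt all_text bullet_points
      = (let ci := pvChainIdx (fun w => PySem.Chars.isIn w.toList all_text.toList) pvRules 0 12
         if ci < 12 then pvTexts.getD ci pvDefault else pvDefault) := by
  simp only [determine_educational_visual_metaphor_py_alt]
  have hlen : pvTexts.length = 12 := by decide
  rw [PySem.List.pyRange_one]
  simp only [sub_zero, Int.toNat_natCast, List.foldl_map, zero_add,
    PySem.List.pyGetD_natCast]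
  rw [pv_outer_eq (fun i => pvByFirst.getD (all_text.toList.getD i ' ') [])
        (fun i kp => PySem.Chars.startswith (all_text.toList.drop i) kp.1.toList),
      pv_fmin_ext _ _ _ (pv_cand_mem all_text.toList),
      ← pv_fold_step_eq (fun kp => PySem.Chars.isIn kp.1.toList all_text.toList), hlen]
  simp only [pvKeywordPriority]
  rw [pv_flat_fold_eq (fun w => PySem.Chars.isIn w.toList all_text.toList) pvRules 0 12 (by decide)]

-- first-match over a rule table, A's chain in generic form
def pvFM (P : String → Bool) : List (List String × String) → String → String
  | [], d => d
  | (kws, _t) :: rest, d => if kws.any P then _t else pvFM P rest d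

theorem pv_chain_ge (P : String → Bool) :
    ∀ (rules : List (List String × String)) (k b : Nat), k ≤ b →
      k ≤ pvChainIdx P rules k b := by
  intro rules
  induction rules with
  | nil => intro k b h; simpa [pvChainIdx] using h
  | cons r rest ih =>
    intro k b h
    obtain ⟨kws, t⟩ := r
    simp only [pvChainIdx]
    by_cases hany : kws.any P = true
    · simp [hany]
    · simp only [hany, Bool.false_eq_true, if_false]
      have := ih (k + 1) b
      by_cases hb : k + 1 ≤ b
      · have := ih (k + 1) b hb; omega
      · -- k = b: chainIdx over rest with start k+1 > b still returns ≥ k? need k ≤ result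
        have hk : k = b := by omega
        subst hk
        -- ChainIdx returns either some index ≥ k+1 or b = k; both ≥ k
        have : ∀ (rs : List (List String × String)) (m : Nat),
            pvChainIdx P rs m k = k ∨ m ≤ pvChainIdx P rs m k := by
          intro rs
          induction rs with
          | nil => intro m; left; rfl
          | cons r' rs' ih' =>
            intro m
            obtain ⟨kws', t'⟩ := r'
            simp only [pvChainIdx]
            by_cases h' : kws'.any P = true
            · right; simp [h']
            · simp only [h', Bool.false_eq_true, if_false]
              rcases ih' (m + 1) with h2 | h2
              · left; exact h2
              · right; omega
        rcases this rest (k + 1) with h2 | h2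
        · omega
        · omega

theorem pv_fm_chain (P : String → Bool) :
    ∀ (rules : List (List String × String)) (k b : Nat) (d : String),
      k + rules.length ≤ b →
      pvFM P rules d = (rules.map Prod.snd).getD (pvChainIdx P rules k b - k) d := by
  intro rules
  induction rules with
  | nil => intro k b d _; rfl
  | cons r rest ih =>
    intro k b d hkb
    obtain ⟨kws, t⟩ := r
    simp only [pvFM, pvChainIdx, List.map_cons, List.length_cons] at *
    by_cases hany : kws.any P = true
    · simp [hany]
    · simp only [hany, Bool.false_eq_true, if_false]
      rw [ih (k + 1) b d (by omega)]
      have hge : k + 1 ≤ pvChainIdx P rest (k + 1) b :=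
        pv_chain_ge P rest (k + 1) b (by omega)
      have hidx : pvChainIdx P rest (k + 1) b - k
          = (pvChainIdx P rest (k + 1) b - (k + 1)) + 1 := by omega
      rw [hidx, List.getD_cons_succ]

-- A's chain, expressed through the same chain index
theorem pv_a_eq_chain (all_text : String) (bullet_points : List String) :
    determine_educational_visual_metaphor_py all_text bullet_points
      = (let ci := pvChainIdx (fun w => PySem.Chars.isIn w.toList all_text.toList) pvRules 0 12
         if ci < 12 then pvTexts.getD ci pvDefault else pvDefault) := by
  have hA : determine_educational_visual_metaphor_py all_text bullet_points
      = pvFM (fun w => PySem.Chars.isIn w.toList all_text.toList) pvRules pvDefault := by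
    simp only [determine_educational_visual_metaphor_py, pvFM, pvRules, pvDefault,
      PySem.Str.isIn_eq]
    rfl
  rw [hA, pv_fm_chain (fun w => PySem.Chars.isIn w.toList all_text.toList) pvRules 0 12 pvDefault
    (by decide)]
  simp only [Nat.sub_zero]
  by_cases hlt : pvChainIdx (fun w => PySem.Chars.isIn w.toList all_text.toList) pvRules 0 12 < 12
  · simp [hlt, pvTexts]
  · simp only [hlt, if_false]
    apply List.getD_eq_default
    have : (pvRules.map Prod.snd).length = 12 := by decide
    omega

-- ===== VERDICT =====
theorem determine_educational_visual_metaphor_py_spec : Claim_equal_determine_educational_visual_metaphor_py := by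
  intro all_text bullet_points _
  unfold Spec_determine_educational_visual_metaphor_py
  rw [pv_a_eq_chain all_text bullet_points, pv_alt_eq_chain all_text bullet_points]
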